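-- pv_equiv track=rewrite | github.com/Truedick23/DataContentSecurity | 3/fmm&bmm.py | get_segment_right
-- ===== SOURCE A (Python) =====
-- def get_segment_right(text, word_list):
--     if text in word_list:
--         return text
--     elif len(text) == 0:
--         return ""
--     elif len(text) == 1:
--         return text
--     else:
--         length = len(text) - 1
--         text = text[:length]
--         return get_segment_right(text, word_list)
-- ===== SOURCE B (Python) =====
-- def get_segment_right(text, word_list):
--     words = set(word_list)
--     for length in range(len(text), 1, -1):
--         if text[:length] in words:
--             return text[:length]
--     return text[:1]
-- ===== Notes on version B (the rewrite author's own statement) =====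
-- stated objective: alternative
-- what changed: Replaces A's tail recursion that repeatedly reslices a shrinking string with an explicit descending loop over prefix lengths of the original text plus a set built once for membership tests.
import Mathlib
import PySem

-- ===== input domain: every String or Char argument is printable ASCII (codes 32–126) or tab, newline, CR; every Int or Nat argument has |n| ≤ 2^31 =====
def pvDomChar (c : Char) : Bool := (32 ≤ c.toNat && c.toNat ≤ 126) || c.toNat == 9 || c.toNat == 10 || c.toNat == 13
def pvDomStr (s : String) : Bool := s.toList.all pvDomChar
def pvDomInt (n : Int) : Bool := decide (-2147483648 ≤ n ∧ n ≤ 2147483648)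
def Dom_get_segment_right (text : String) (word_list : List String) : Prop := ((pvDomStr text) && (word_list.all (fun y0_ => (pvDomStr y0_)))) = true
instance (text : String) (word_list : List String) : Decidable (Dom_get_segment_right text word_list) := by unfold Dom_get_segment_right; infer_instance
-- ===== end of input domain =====

-- B replaces A's tail recursion on a shrinking string by an explicit descending loop over
-- prefix lengths of the original text, with word_list turned into a set once (alternative
-- decomposition; equivalence of the RETURN value is what is proved).

-- ===== PORT A =====
-- A's recursion, carried out on the character list of the string (each step reslices
-- text to text[:len(text)-1], exactly as the Python does; slice via PySem.List.slice).
-- termination of A's recursion: the reslice text[:len-1] is strictly shorter (cited by segA's decreasing_by)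
theorem segA_dec (cs : List Char) (h2 : cs.length ≠ 0) :
    (PySem.List.slice cs none (some ((cs.length : Int) - 1))).length < cs.length := by
  rw [PySem.List.slice_to _ (by omega)]
  simp only [List.length_take]
  omega

def segA (cs : List Char) (word_list : List String) : String :=
  if String.ofList cs ∈ word_list then String.ofList cs
  else if cs.length = 0 then ""
  else if cs.length = 1 then String.ofList cs
  else
    let length : Int := (cs.length : Int) - 1
    segA (PySem.List.slice cs none (some length)) word_list
termination_by cs.length
decreasing_by exact segA_dec cs (by omega)

def get_segment_right (text : String) (word_list : List String) : String :=
  segA text.toList word_list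

-- ===== PORT B =====
-- the for-loop of Source B: first prefix length in range(len(text), 1, -1) whose prefix is in
-- the set; the loop's fallback is text[:1].
def bLoop (cs : List Char) (words : PySem.Set String) : List Int → String
  | [] => String.ofList (PySem.List.slice cs none (some 1))
  | l :: rest =>
    let pref := String.ofList (PySem.List.slice cs none (some l))
    if words.contains pref then pref else bLoop cs words rest

def get_segment_right_alt (text : String) (word_list : List String) : String :=
  bLoop text.toList (PySem.Set.ofList word_list)
    (PySem.List.pyRange (text.toList.length : Int) 1 (-1))

-- ===== PRECONDITION & SPEC =====
def Spec_get_segment_right (text : String) (word_list : List String) (out : String) : Prop := out = get_segment_right_alt text word_list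
instance (text : String) (word_list : List String) (out : String) : Decidable (Spec_get_segment_right text word_list out) := by unfold Spec_get_segment_right; infer_instance

-- ===== CLAIM (what is proved, stated in full; the proofs are below) =====
def Claim_equal_get_segment_right : Prop := ∀ (text : String) (word_list : List String), Dom_get_segment_right text word_list → Spec_get_segment_right text word_list (get_segment_right text word_list)

-- ===== LEMMAS AND PROOFS =====

-- bLoop only looks at prefixes of cs of lengths occurring in the range (and the fallback
-- prefix of length 1), so truncating cs beyond those lengths does not change it.
theorem bLoop_take (cs : List Char) (ws : PySem.Set String) (k : Nat) (hk : 1 ≤ k) :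
    ∀ r : List Int, (∀ l ∈ r, 0 ≤ l ∧ l ≤ (k : Int)) →
      bLoop (cs.take k) ws r = bLoop cs ws r := by
  intro r
  induction r with
  | nil =>
    intro _
    simp [bLoop, PySem.List.slice_to _ (by omega : (0:Int) ≤ 1), List.take_take,
      Nat.min_eq_left hk]
  | cons l rest ih =>
    intro h
    obtain ⟨hl0, hl⟩ := h l (by simp)
    have hrest : ∀ x ∈ rest, 0 ≤ x ∧ x ≤ (k : Int) := fun x hx => h x (by simp [hx])
    have hlk : l.toNat ≤ k := by omega
    simp only [bLoop, PySem.List.slice_to _ hl0, List.take_take, Nat.min_eq_left hlk]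
    split
    · rfl
    · exact ih hrest

-- main invariant: A's recursion equals B's loop over pyRange (length) 1 (-1)
theorem segA_eq_bLoop (n : Nat) : ∀ cs : List Char, cs.length = n → ∀ wl : List String,
    segA cs wl = bLoop cs (PySem.Set.ofList wl) (PySem.List.pyRange (n : Int) 1 (-1)) := by
  induction n using Nat.strong_induction_on with
  | _ n ih =>
    intro cs hlen wl
    by_cases hn1 : n ≤ 1
    · rw [PySem.List.pyRange_neg_one_eq_nil (by exact_mod_cast hn1)]
      simp only [bLoop, PySem.List.slice_to _ (by omega : (0:Int) ≤ 1)]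
      interval_cases n
      · have : cs = [] := List.length_eq_zero_iff.mp hlen
        subst this
        rw [segA]
        simp
      · have htake : cs.take (1:Int).toNat = cs := List.take_of_length_le (by omega)
        rw [htake, segA]
        simp [hlen]
    · rw [Nat.not_le] at hn1
      have h1n : (1:Int) < (n:Int) := by exact_mod_cast hn1
      rw [PySem.List.pyRange_neg_one_cons h1n]
      have hslice : PySem.List.slice cs none (some ((n:Int))) = cs := by
        rw [PySem.List.slice_to _ (by omega)]
        exact List.take_of_length_le (by simp [hlen])
      by_cases hmem : String.ofList cs ∈ wl
      · have hc : (PySem.Set.ofList wl).contains (String.ofList cs) = true :=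
          (PySem.Set.contains_iff _ _).mpr ((PySem.Set.mem_ofList _ _).mpr hmem)
        rw [segA]
        simp only [bLoop, hslice, hmem, if_pos, hc]
      · have hc : (PySem.Set.ofList wl).contains (String.ofList cs) = false := by
          rw [Bool.eq_false_iff]
          intro hcon
          exact hmem ((PySem.Set.mem_ofList _ _).mp ((PySem.Set.contains_iff _ _).mp hcon))
        have hA : segA cs wl = segA (cs.take (n - 1)) wl := by
          rw [segA]
          rw [if_neg hmem, if_neg (by omega : ¬ cs.length = 0), if_neg (by omega : ¬ cs.length = 1)]
          show segA (PySem.List.slice cs none (some ((cs.length : Int) - 1))) wl =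
            segA (cs.take (n - 1)) wl
          rw [PySem.List.slice_to _ (by rw [hlen]; omega : (0:Int) ≤ (cs.length:Int) - 1)]
          rw [show ((cs.length : Int) - 1).toNat = n - 1 by rw [hlen]; omega]
        have hlen' : (cs.take (n - 1)).length = n - 1 := by
          simp [List.length_take, hlen]
        have hIH := ih (n - 1) (by omega) (cs.take (n - 1)) hlen' wl
        have hcast : ((n - 1 : Nat) : Int) = (n : Int) - 1 := by omega
        rw [hA, hIH, hcast]
        rw [bLoop_take cs (PySem.Set.ofList wl) (n - 1) (by omega)
          (PySem.List.pyRange ((n:Int) - 1) 1 (-1))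
          (by
            intro x hx
            have := PySem.List.mem_pyRange_neg_one.mp hx
            constructor <;> omega)]
        simp only [bLoop, hslice, hc, Bool.false_eq_true, if_false]

-- ===== VERDICT (by name: the statement is the Claim_ definition above) =====
theorem get_segment_right_spec : Claim_equal_get_segment_right := by
  intro text wl _
  unfold Spec_get_segment_right get_segment_right get_segment_right_alt
  exact segA_eq_bLoop text.toList.length text.toList rfl wl
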